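-- pv_equiv track=rewrite | github.com/mm4958/college_towns | 3_eachschoolyears_v6.py | years_to_spells
-- ===== SOURCE A (Python) =====
-- def years_to_spells(years, max_gap=5):
--     if not years:
--         return []
--     years = sorted(years)
--     spells = []
--     start = prev = years[0]
--     for y in years[1:]:
--         if y - prev <= max_gap:
--             prev = y
--         else:
--             spells.append((start, prev))
--             start = prev = y
--     spells.append((start, prev))
--     return spells
-- ===== SOURCE B (Python) =====
-- def years_to_spells(years, max_gap=5):
--     if not years:
--         return []
--     ys = sorted(years)
--     breaks = [(a, b) for a, b in zip(ys, ys[1:]) if b - a > max_gap]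
--     starts = [ys[0]] + [b for a, b in breaks]
--     ends = [a for a, b in breaks] + [ys[-1]]
--     return list(zip(starts, ends))
-- ===== Notes on version B (the rewrite author's own statement) =====
-- stated objective: alternative
-- what changed: Replaces A's single stateful scan with running start/prev accumulators by a boundary computation: collect the adjacent pairs whose gap exceeds max_gap, derive the spell-start and spell-end lists from them, and zip those together.
import Mathlib
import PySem

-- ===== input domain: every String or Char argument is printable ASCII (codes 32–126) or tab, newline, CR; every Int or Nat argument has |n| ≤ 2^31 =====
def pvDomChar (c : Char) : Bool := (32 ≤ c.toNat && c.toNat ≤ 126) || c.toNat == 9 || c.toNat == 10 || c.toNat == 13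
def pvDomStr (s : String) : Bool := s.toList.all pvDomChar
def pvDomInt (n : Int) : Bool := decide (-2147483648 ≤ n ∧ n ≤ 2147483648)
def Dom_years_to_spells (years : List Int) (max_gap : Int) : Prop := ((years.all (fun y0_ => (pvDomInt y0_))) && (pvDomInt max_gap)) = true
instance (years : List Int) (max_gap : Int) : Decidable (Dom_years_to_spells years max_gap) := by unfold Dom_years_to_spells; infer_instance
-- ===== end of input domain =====

-- B replaces A's stateful start/prev scan by a boundary computation (gap pairs -> starts/ends lists -> zip); alternative decomposition, same cost.


-- ===== PORT A =====
-- literal transliteration: guard on empty, sort, fold over ys[1:] with state (spells, start, prev), final append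
def years_to_spells (years : List Int) (max_gap : Int) : List (Int × Int) :=
  match PySem.List.sorted years (fun y => y) false with
  | [] => []
  | y0 :: rest =>
    let st := rest.foldl
      (fun (st : List (Int × Int) × Int × Int) y =>
        if y - st.2.2 ≤ max_gap then (st.1, st.2.1, y)
        else (st.1 ++ [(st.2.1, st.2.2)], y, y))
      ([], y0, y0)
    st.1 ++ [(st.2.1, st.2.2)]

-- ===== PORT B =====
-- literal transliteration of Source B: breaks = gap pairs of zip(ys, ys[1:]); starts/ends derived from them; zip
def years_to_spells_alt (years : List Int) (max_gap : Int) : List (Int × Int) :=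
  match PySem.List.sorted years (fun y => y) false with
  | [] => []
  | y0 :: rest =>
    let breaks := (List.zip (y0 :: rest) rest).filter (fun p => decide (max_gap < p.2 - p.1))
    let starts := y0 :: breaks.map (fun p => p.2)
    let ends := breaks.map (fun p => p.1) ++ [rest.getLastD y0]
    List.zip starts ends

-- ===== PRECONDITION & SPEC =====
def Spec_years_to_spells (years : List Int) (max_gap : Int) (out : List (Int × Int)) : Prop := out = years_to_spells_alt years max_gap
instance (years : List Int) (max_gap : Int) (out : List (Int × Int)) : Decidable (Spec_years_to_spells years max_gap out) := by unfold Spec_years_to_spells; infer_instance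

-- ===== CLAIM (what is proved, stated in full; the proofs are below) =====
def Claim_equal_years_to_spells : Prop := ∀ (years : List Int) (max_gap : Int), Dom_years_to_spells years max_gap → Spec_years_to_spells years max_gap (years_to_spells years max_gap)

-- ===== LEMMAS AND PROOFS =====

-- reference recursion: the grouping both programs compute
def pvGo (g : Int) (start prev : Int) : List Int → List (Int × Int)
  | [] => [(start, prev)]
  | y :: tl => if y - prev ≤ g then pvGo g start y tl else (start, prev) :: pvGo g y y tl

theorem pvA_go (g : Int) : ∀ (rest : List Int) (spells : List (Int × Int)) (start prev : Int),
    (let st := rest.foldl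
      (fun (st : List (Int × Int) × Int × Int) y =>
        if y - st.2.2 ≤ g then (st.1, st.2.1, y)
        else (st.1 ++ [(st.2.1, st.2.2)], y, y))
      (spells, start, prev)
     st.1 ++ [(st.2.1, st.2.2)]) = spells ++ pvGo g start prev rest := by
  intro rest
  induction rest with
  | nil => intro spells start prev; simp [pvGo]
  | cons y tl ih =>
    intro spells start prev
    by_cases h : y - prev ≤ g
    · simp only [List.foldl_cons, pvGo, if_pos h, ih]
    · simp only [List.foldl_cons, pvGo, if_neg h, ih, List.append_assoc,
        List.singleton_append]

theorem pvB_go (g : Int) : ∀ (rest : List Int) (start prev : Int),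
    List.zip
      (start :: ((List.zip (prev :: rest) rest).filter (fun p => decide (g < p.2 - p.1))).map (fun p => p.2))
      (((List.zip (prev :: rest) rest).filter (fun p => decide (g < p.2 - p.1))).map (fun p => p.1)
        ++ [rest.getLastD prev]) = pvGo g start prev rest := by
  intro rest
  induction rest with
  | nil => intro start prev; simp [pvGo]
  | cons y tl ih =>
    intro start prev
    by_cases h : y - prev ≤ g
    · have hc : ¬ (g < y - prev) := by omega
      simp only [List.zip_cons_cons, List.filter_cons, decide_eq_true_eq, if_neg hc, pvGo, if_pos h,
        List.getLastD_cons]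
      exact ih start y
    · have hc : g < y - prev := by omega
      simp only [List.zip_cons_cons, List.filter_cons, decide_eq_true_eq, if_pos hc, List.map_cons,
        pvGo, if_neg h]
      simp only [List.cons_append, List.zip_cons_cons, List.getLastD_cons]
      rw [← ih y y]

-- ===== VERDICT (by name: the statement is the Claim_ definition above) =====
theorem years_to_spells_spec : Claim_equal_years_to_spells := by
  intro years g _
  unfold Spec_years_to_spells years_to_spells years_to_spells_alt
  cases h : PySem.List.sorted years (fun y => y) false with
  | nil => rfl
  | cons y0 rest =>
    simp only
    rw [pvB_go g rest y0 y0]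
    have := pvA_go g rest [] y0 y0
    simpa using this
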